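-- pv_equiv track=rewrite | github.com/DavVratChadha/ESC180-Python-Files | Strings and Password generator.py | n_as_plus_b2
-- ===== SOURCE A (Python) =====
-- def n_as_plus_b2(s):
--     """Return the maximum number of "a"s followed by a "b" in the string s"""
--     curr_run = 0 #number of "a"s in current run
--     curr_max_run = -1 #the max number run of"a"s in an aaa....aaab sequence
--
--     for i in range(len(s)):
--         if s[i] == "b":
--             curr_max_run = max(curr_max_run, curr_run)
--             curr_run = 0
--         elif s[i] == "a":
--             curr_run += 1
--         else:
--             curr_run = 0
--     if curr_max_run > 0:
--         return curr_max_run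
--     else:
--         return 0
-- ===== SOURCE B (Python) =====
-- def n_as_plus_b2(s):
--     """Return the maximum number of "a"s followed by a "b" in the string s"""
--     parts = s.split("b")
--     return max((len(p) - len(p.rstrip("a")) for p in parts[:-1]), default=0)
-- ===== Notes on version B (the rewrite author's own statement) =====
-- stated objective: simpler
-- what changed: Replaces A's fused indexed loop carrying (curr_run, curr_max_run) with split-then-reduce: the run before each occurrence of the separator is the trailing-run count (len(p) - len(p.rstrip('a'))) of the corresponding segment of s.split('b')[:-1], reduced with max(..., default=0).
import Mathlib
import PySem

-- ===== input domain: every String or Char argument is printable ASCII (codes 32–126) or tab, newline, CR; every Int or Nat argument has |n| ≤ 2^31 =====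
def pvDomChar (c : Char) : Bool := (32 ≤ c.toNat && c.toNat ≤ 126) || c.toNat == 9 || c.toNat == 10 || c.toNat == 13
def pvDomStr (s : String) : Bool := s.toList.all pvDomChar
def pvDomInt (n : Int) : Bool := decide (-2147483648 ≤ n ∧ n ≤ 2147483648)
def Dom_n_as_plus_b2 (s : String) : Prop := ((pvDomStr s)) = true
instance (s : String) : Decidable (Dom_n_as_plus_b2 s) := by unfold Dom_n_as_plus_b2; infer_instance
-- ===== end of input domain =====

-- B replaces A's fused index loop with split-on-'b' then reduce: the run of 'a's before each
-- 'b' is the trailing-'a' count of the corresponding split segment (objective: simpler).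

-- ===== PORT A =====
-- literal transliteration of A: indexed loop over range(len(s)) carrying (curr_run, curr_max_run)
def n_as_plus_b2 (s : String) : Int :=
  let st := (PySem.List.pyRange 0 (PySem.Str.len s) 1).foldl
    (fun (st : Int × Int) i =>
      match PySem.Str.pyGet? s i with          -- s[i]; i ∈ range(len(s)) so never IndexError
      | some c =>
        if c = 'b' then (0, max st.2 st.1)     -- curr_max_run = max(...); curr_run = 0
        else if c = 'a' then (st.1 + 1, st.2)  -- curr_run += 1
        else (0, st.2)                          -- curr_run = 0
      | none => st)
    (0, -1)
  if st.2 > 0 then st.2 else 0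

-- ===== PORT B =====
-- hand port of Python p.rstrip("a") (PySem has no rstrip-with-chars); exact: drops trailing 'a's
def rstripA (p : List Char) : List Char := ((p.reverse).dropWhile (· == 'a')).reverse

def n_as_plus_b2_alt (s : String) : Int :=
  let parts := PySem.Chars.splitOn s.toList ['b']          -- s.split("b")
  let vals := (PySem.List.slice parts none (some (-1))).map -- parts[:-1]
      (fun p => (PySem.List.len p) - (PySem.List.len (rstripA p)))
  match PySem.List.max? vals (fun v => v) with              -- max(..., default=0)
  | some m => m
  | none => 0

-- ===== PRECONDITION & SPEC =====
def Spec_n_as_plus_b2 (s : String) (out : Int) : Prop := out = n_as_plus_b2_alt s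
instance (s : String) (out : Int) : Decidable (Spec_n_as_plus_b2 s out) := by unfold Spec_n_as_plus_b2; infer_instance

-- ===== CLAIM (what is proved, stated in full; the proofs are below) =====
def Claim_equal_n_as_plus_b2 : Prop := ∀ (s : String), Dom_n_as_plus_b2 s → Spec_n_as_plus_b2 s (n_as_plus_b2 s)

-- ===== LEMMAS AND PROOFS =====

-- simple recursive characterisation of splitting on 'b'
def splitB : List Char → List (List Char)
  | [] => [[]]
  | c :: t => if c = 'b' then [] :: splitB t else (splitB t).modifyHead (c :: ·)

theorem splitB_ne_nil (l : List Char) : splitB l ≠ [] := by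
  induction l with
  | nil => simp [splitB]
  | cons c t ih =>
    simp only [splitB]
    split
    · simp
    · cases h : splitB t with
      | nil => exact absurd h ih
      | cons p ps => simp [List.modifyHead]

theorem go_eq : ∀ (fuel : Nat) (l cur : List Char) (acc : List (List Char)), l.length ≤ fuel →
    PySem.Chars.splitOn.go ['b'] fuel l cur acc
      = acc.reverse ++ (splitB l).modifyHead (cur.reverse ++ ·) := by
  intro fuel
  induction fuel with
  | zero =>
    intro l cur acc h
    have : l = [] := by cases l <;> simp_all
    subst this
    simp [PySem.Chars.splitOn.go, splitB]
  | succ f ih =>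
    intro l cur acc h
    cases l with
    | nil => simp [PySem.Chars.splitOn.go, splitB]
    | cons c rest =>
      have hr : rest.length ≤ f := by simpa using h
      by_cases hc : c = 'b'
      · subst hc
        rw [PySem.Chars.splitOn.go]
        simp only [List.isPrefixOf, BEq.rfl, Bool.true_and, if_pos,
          List.length_cons, List.length_nil, List.drop_succ_cons, List.drop_zero]
        rw [ih _ _ _ hr]
        cases h2 : splitB rest with
        | nil => exact absurd h2 (splitB_ne_nil rest)
        | cons p ps => simp [splitB, List.modifyHead, h2]
      · rw [PySem.Chars.splitOn.go]
        rw [if_neg (by simp [List.isPrefixOf, Ne.symm hc])]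
        rw [ih _ _ _ hr]
        have hsp : splitB (c :: rest) = (splitB rest).modifyHead (c :: ·) := by
          simp [splitB, hc]
        rw [hsp]
        cases h2 : splitB rest with
        | nil => exact absurd h2 (splitB_ne_nil rest)
        | cons p ps => simp [List.modifyHead]

theorem splitOn_eq_splitB (cs : List Char) : PySem.Chars.splitOn cs ['b'] = splitB cs := by
  rw [PySem.Chars.splitOn, go_eq _ _ _ _ (by omega)]
  cases h2 : splitB cs with
  | nil => exact absurd h2 (splitB_ne_nil cs)
  | cons p ps => simp [List.modifyHead]

-- trailing-'a' count of a segment, and the generalised segment value carrying an incoming run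
def tA (p : List Char) : Int := ((p.reverse.takeWhile (· == 'a')).length : Int)
def allA (p : List Char) : Bool := p.all (· == 'a')
def segA (r : Int) (p : List Char) : Int := if allA p then r + p.length else tA p

def stepA (st : Int × Int) (c : Char) : Int × Int :=
  if c = 'b' then (0, max st.2 st.1) else if c = 'a' then (st.1 + 1, st.2) else (0, st.2)

def contribs (r : Int) (cs : List Char) : List Int :=
  match (splitB cs).dropLast with
  | [] => []
  | p :: ps => segA r p :: ps.map tA

theorem tA_allA (p : List Char) (h : allA p = true) : tA p = (p.length : Int) := by
  unfold tA
  rw [List.takeWhile_eq_self_iff.mpr ?_]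
  · simp
  · intro x hx
    exact (List.all_eq_true.mp h) x (List.mem_reverse.mp hx)

theorem segA_zero (p : List Char) : segA 0 p = tA p := by
  unfold segA
  split
  · rw [tA_allA p (by assumption)]; ring
  · rfl

theorem lenTW_iff (p : List Char) :
    ((p.reverse.takeWhile (· == 'a')).length = p.reverse.length) ↔ allA p = true := by
  constructor
  · intro h
    have heq : p.reverse.takeWhile (· == 'a') = p.reverse :=
      (List.takeWhile_prefix _).eq_of_length h
    have := List.takeWhile_eq_self_iff.mp heq
    simp only [allA, List.all_eq_true]
    intro x hx
    exact this x (List.mem_reverse.mpr hx)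
  · intro h
    rw [List.takeWhile_eq_self_iff.mpr (fun x hx =>
      (List.all_eq_true.mp h) x (List.mem_reverse.mp hx))]

theorem segA_cons_a (r : Int) (p : List Char) : segA r ('a' :: p) = segA (r + 1) p := by
  unfold segA
  have hall : allA ('a' :: p) = allA p := by simp [allA]
  rw [hall]
  by_cases h : allA p = true
  · rw [if_pos h, if_pos h]
    simp only [List.length_cons]
    push_cast
    ring
  · rw [if_neg h, if_neg h]
    unfold tA
    simp only [List.reverse_cons]
    rw [List.takeWhile_append, if_neg (fun hh => h ((lenTW_iff p).mp hh))]

theorem segA_cons_other (r : Int) (c : Char) (p : List Char) (hc : c ≠ 'a') :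
    segA r (c :: p) = tA p := by
  unfold segA
  have hall : allA (c :: p) = false := by simp [allA, hc]
  rw [hall]
  simp only [Bool.false_eq_true, if_false]
  unfold tA
  simp only [List.reverse_cons]
  rw [List.takeWhile_append]
  by_cases h : allA p = true
  · rw [if_pos ((lenTW_iff p).mpr h)]
    have h2 : (p.reverse.takeWhile (· == 'a')).length = p.reverse.length := (lenTW_iff p).mpr h
    simp [hc, h2]
  · rw [if_neg (fun hh => h ((lenTW_iff p).mp hh))]

-- final value of curr_run: the incoming run r only survives while no 'b' was seen
def finA (r : Int) (cs : List Char) : Int :=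
  match splitB cs with
  | [p] => segA r p
  | l => tA (l.getLastD [])

-- the central loop invariant: A's fold over the characters, expressed through splitB
theorem foldA (cs : List Char) : ∀ (r mx : Int),
    List.foldl stepA (r, mx) cs
      = (finA r cs, List.foldl max mx (contribs r cs)) := by
  induction cs with
  | nil =>
    intro r mx
    simp [splitB, contribs, finA, segA, allA]
  | cons c t ih =>
    intro r mx
    by_cases hc : c = 'b'
    · subst hc
      have hstep : stepA (r, mx) 'b' = (0, max mx r) := by simp [stepA]
      rw [List.foldl_cons, hstep, ih]
      have hsp : splitB ('b' :: t) = [] :: splitB t := by simp [splitB]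
      cases h2 : splitB t with
      | nil => exact absurd h2 (splitB_ne_nil t)
      | cons p ps =>
        simp only [Prod.mk.injEq]
        refine ⟨?_, ?_⟩
        · show finA 0 t = finA r ('b' :: t)
          rw [show finA r ('b' :: t) = tA ((p :: ps).getLastD []) by
            unfold finA; rw [hsp, h2]; cases ps <;> rfl]
          unfold finA
          rw [h2]
          cases ps with
          | nil => simp [segA_zero]
          | cons q qs => rfl
        · rw [show contribs r ('b' :: t) = r :: (splitB t).dropLast.map tA by
            simp [contribs, hsp, h2, segA, allA]]
          rw [show contribs 0 t = (splitB t).dropLast.map tA by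
            unfold contribs
            cases h3 : (splitB t).dropLast with
            | nil => simp
            | cons q qs => simp [segA_zero]]
          simp
    · have hsp : splitB (c :: t) = (splitB t).modifyHead (c :: ·) := by simp [splitB, hc]
      have hseg : ∀ p, segA r (c :: p) = segA (stepA (r, mx) c).1 p := by
        intro p
        by_cases ha : c = 'a'
        · subst ha; simp [stepA, segA_cons_a]
        · rw [segA_cons_other r c p ha, show (stepA (r, mx) c).1 = 0 by simp [stepA, hc, ha],
            segA_zero]
      have hmx : (stepA (r, mx) c).2 = mx := by
        by_cases ha : c = 'a' <;> simp [stepA, hc, ha]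
      rw [List.foldl_cons]
      have := ih (stepA (r, mx) c).1 (stepA (r, mx) c).2
      rw [show stepA (r, mx) c = ((stepA (r, mx) c).1, (stepA (r, mx) c).2) from rfl] at *
      rw [this, hmx]
      cases h2 : splitB t with
      | nil => exact absurd h2 (splitB_ne_nil t)
      | cons p ps =>
        cases h3 : ps with
        | nil =>
          subst h3
          simp only [Prod.mk.injEq]
          refine ⟨?_, ?_⟩
          · show finA (stepA (r, mx) c).1 t = finA r (c :: t)
            unfold finA
            rw [hsp, h2]
            simp only [List.modifyHead]
            exact (hseg p).symm
          · rw [show contribs r (c :: t) = [] by simp [contribs, hsp, h2, List.modifyHead],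
              show contribs (stepA (r, mx) c).1 t = [] by simp [contribs, h2]]
        | cons q qs =>
          subst h3
          simp only [Prod.mk.injEq]
          refine ⟨?_, ?_⟩
          · show finA (stepA (r, mx) c).1 t = finA r (c :: t)
            unfold finA
            rw [hsp, h2]
            simp [List.modifyHead]
          · rw [show contribs r (c :: t)
                = segA r (c :: p) :: ((q :: qs).dropLast).map tA by
              simp [contribs, hsp, h2, List.modifyHead],
              show contribs (stepA (r, mx) c).1 t
                = segA (stepA (r, mx) c).1 p :: ((q :: qs).dropLast).map tA by
              simp [contribs, h2]]
            rw [hseg]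

-- bridge: the indexed range loop of port A is the character fold
theorem bridgeA (s : String) :
    (PySem.List.pyRange 0 (PySem.Str.len s) 1).foldl
      (fun (st : Int × Int) i =>
        match PySem.Str.pyGet? s i with
        | some c =>
          if c = 'b' then (0, max st.2 st.1)
          else if c = 'a' then (st.1 + 1, st.2)
          else (0, st.2)
        | none => st)
      (0, -1)
    = List.foldl stepA (0, -1) s.toList := by
  rw [PySem.List.foldl_congr_mem _ _
    (fun (st : Int × Int) i => stepA st (PySem.List.pyGetD s.toList i 'z')) _ ?_]
  · have hlen : PySem.Str.len s = PySem.List.len s.toList := by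
      simp [PySem.Str.len, PySem.List.len]
    rw [hlen]
    have := PySem.List.foldl_pyRange_pyGetD s.toList 'z' stepA ((0 : Int), (-1 : Int))
      (a := 0) (le_refl 0)
    simpa using this
  · intro acc x hx
    obtain ⟨h0, h1⟩ := PySem.List.mem_pyRange_one.mp hx
    have hlen : (s.toList.length : Int) = PySem.Str.len s := by
      simp [PySem.Str.len]
    lift x to ℕ using h0 with n
    have hlt : n < s.toList.length := by omega
    have hget : PySem.Str.pyGet? s ((n : Nat) : Int) = some (s.toList[n]) := by
      simp [List.getElem?_eq_getElem hlt]
    rw [hget]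
    simp [PySem.List.pyGetD, PySem.List.pyGet?_natCast, List.getElem?_eq_getElem hlt, stepA]

-- the per-segment value of port B is the trailing-'a' count
theorem val_eq_tA (p : List Char) :
    PySem.List.len p - PySem.List.len (rstripA p) = tA p := by
  unfold rstripA tA
  simp only [PySem.List.len, List.length_reverse]
  have := congrArg List.length (List.takeWhile_append_dropWhile (p := (· == 'a')) (l := p.reverse))
  simp only [List.length_append, List.length_reverse] at this
  omega

theorem max?_some (l : List Int) (m : Int) :
    PySem.List.max? (m :: l) (fun v => v) = some (List.foldl max m l) := by
  induction l generalizing m with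
  | nil => simp [PySem.List.max?]
  | cons x t ih =>
    have h1 : PySem.List.max? (m :: x :: t) (fun v => v)
        = PySem.List.max? (max m x :: t) (fun v => v) := by
      simp only [PySem.List.max?, List.foldl_cons]
      congr 1
      by_cases h : m < x
      · simp [h, max_eq_right (le_of_lt h)]
      · simp [h, max_eq_left (by omega : x ≤ m)]
    rw [h1, ih]
    simp

theorem le_foldl_max (l : List Int) (m : Int) : m ≤ List.foldl max m l := by
  induction l generalizing m with
  | nil => simp
  | cons x t ih => exact le_trans (le_max_left m x) (ih (max m x))

-- assembling the maxima: A's guarded fold against B's max-with-default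
theorem final_eq (l : List Int) (hnn : ∀ x ∈ l, 0 ≤ x) :
    (if List.foldl max (-1) l > 0 then List.foldl max (-1) l else 0)
      = (match PySem.List.max? l (fun v => v) with | some m => m | none => 0) := by
  cases l with
  | nil => simp [PySem.List.max?]
  | cons h t =>
    have h0 : (0 : Int) ≤ h := hnn h (by simp)
    rw [max?_some]
    have hfold : List.foldl max (-1) (h :: t) = List.foldl max h t := by
      simp [max_eq_right (by omega : (-1 : Int) ≤ h)]
    rw [hfold]
    have hge : (0 : Int) ≤ List.foldl max h t := le_trans h0 (le_foldl_max t h)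
    by_cases hp : List.foldl max h t > 0
    · simp [hp]
    · simp only [hp, if_false]
      omega

-- ===== VERDICT (by name: the statement is the Claim_ definition above) =====
theorem n_as_plus_b2_spec : Claim_equal_n_as_plus_b2 := by
  intro s _
  unfold Spec_n_as_plus_b2 n_as_plus_b2 n_as_plus_b2_alt
  simp only []
  rw [bridgeA, foldA]
  rw [splitOn_eq_splitB]
  have hslice : PySem.List.slice (splitB s.toList) none (some (-1))
      = (splitB s.toList).dropLast := by
    simp [PySem.List.slice, List.dropLast_eq_take]
  rw [hslice]
  have hvals : ((splitB s.toList).dropLast).map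
      (fun p => PySem.List.len p - PySem.List.len (rstripA p))
      = ((splitB s.toList).dropLast).map tA := by
    exact List.map_congr_left (fun p _ => val_eq_tA p)
  rw [hvals]
  have hcontribs : contribs 0 s.toList = ((splitB s.toList).dropLast).map tA := by
    unfold contribs
    cases h3 : (splitB s.toList).dropLast with
    | nil => simp
    | cons q qs => simp [segA_zero]
  rw [hcontribs]
  refine final_eq _ ?_
  intro x hx
  obtain ⟨p, _, hp⟩ := List.mem_map.mp hx
  rw [← hp]
  unfold tA
  positivity
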